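-- pv_equiv track=rewrite | github.com/jimmy5227/-18.2-Python-Data-Structures | fs_3_three_odd_numbers/three_odd_numbers.py | three_odd_numbers
-- ===== SOURCE A (Python) =====
-- def three_odd_numbers(nums):
--     """Is the sum of any 3 sequential numbers odd?"
--
--         >>> three_odd_numbers([1, 2, 3, 4, 5])
--         True
--
--         >>> three_odd_numbers([0, -2, 4, 1, 9, 12, 4, 1, 0])
--         True
--
--         >>> three_odd_numbers([5, 2, 1])
--         False
--
--         >>> three_odd_numbers([1, 2, 3, 3, 2])
--         False
--     """
--     sum = 0
--     for i in range(len(nums)):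
--         if len(nums[i: i + 3]) < 3:
--             break
--         for j in nums[i: i + 3]:
--             sum += j
--         if sum % 2 == 0:
--             sum = 0
--         else:
--             return True
--     return False
-- ===== SOURCE B (Python) =====
-- def three_odd_numbers(nums):
--     """Is the sum of any 3 sequential numbers odd?"""
--     if len(nums) < 3:
--         return False
--     total = nums[0] + nums[1] + nums[2]
--     if total % 2:
--         return True
--     for out_elem, in_elem in zip(nums, nums[3:]):
--         total += in_elem - out_elem
--         if total % 2:
--             return True
--     return False
-- ===== Notes on version B (the rewrite author's own statement) =====
-- stated objective: alternative
-- what changed: Replaces A's per-index slicing and inner summation loop with a single sliding-window running total that is updated by subtracting the leaving element and adding the entering one.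
import Mathlib
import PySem

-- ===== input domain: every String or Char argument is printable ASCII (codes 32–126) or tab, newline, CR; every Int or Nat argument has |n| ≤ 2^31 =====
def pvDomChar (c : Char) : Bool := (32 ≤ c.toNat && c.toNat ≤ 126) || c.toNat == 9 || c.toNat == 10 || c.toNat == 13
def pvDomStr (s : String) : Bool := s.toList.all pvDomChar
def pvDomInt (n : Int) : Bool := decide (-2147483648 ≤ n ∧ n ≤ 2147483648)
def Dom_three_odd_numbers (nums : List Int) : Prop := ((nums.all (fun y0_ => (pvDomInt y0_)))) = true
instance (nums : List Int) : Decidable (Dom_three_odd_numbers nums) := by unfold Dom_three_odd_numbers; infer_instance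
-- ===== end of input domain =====

-- B replaces A's per-index slice-and-resum with a single sliding running total (alternative decomposition, same O(n) cost).

-- ===== PORT A =====
-- loop over i in range(len(nums)) with accumulator `sum`; breaks when the slice is short
def three_odd_numbers_loopA (nums : List Int) (i : Nat) (s : Int) : Bool :=
  if _h : i < nums.length then
    let w := PySem.List.slice nums (some (i : Int)) (some ((i : Int) + 3))
    if w.length < 3 then false            -- `break` then `return False`
    else
      let s' := w.foldl (· + ·) s         -- for j in nums[i:i+3]: sum += j
      if PySem.Int.mod s' 2 == 0 then three_odd_numbers_loopA nums (i + 1) 0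
      else true
  else false
termination_by nums.length - i

def three_odd_numbers (nums : List Int) : Bool :=
  three_odd_numbers_loopA nums 0 0

-- ===== PORT B =====
-- the zip(nums, nums[3:]) loop: x leaves the window, y enters it
def three_odd_numbers_loopB : Int → List Int → List Int → Bool
  | t, x :: xs, y :: ys =>
    let t' := t + (y - x)
    if PySem.Int.mod t' 2 ≠ 0 then true else three_odd_numbers_loopB t' xs ys
  | _, _, _ => false

def three_odd_numbers_alt (nums : List Int) : Bool :=
  match nums with
  | a :: b :: c :: rest =>
    let total := a + b + c
    if PySem.Int.mod total 2 ≠ 0 then true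
    else three_odd_numbers_loopB total (a :: b :: c :: rest) rest
  | _ => false                             -- len(nums) < 3

-- ===== PRECONDITION & SPEC =====
def Spec_three_odd_numbers (nums : List Int) (out : Bool) : Prop := out = three_odd_numbers_alt nums
instance (nums : List Int) (out : Bool) : Decidable (Spec_three_odd_numbers nums out) := by unfold Spec_three_odd_numbers; infer_instance

-- ===== CLAIM (what is proved, stated in full; the proofs are below) =====
def Claim_equal_three_odd_numbers : Prop := ∀ (nums : List Int), Dom_three_odd_numbers nums → Spec_three_odd_numbers nums (three_odd_numbers nums)

-- ===== LEMMAS AND PROOFS =====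

-- reference form: does some window of three consecutive elements have an odd sum?
def pvWin : List Int → Bool
  | a :: b :: c :: rest =>
    (PySem.Int.mod (a + b + c) 2 ≠ 0) || pvWin (b :: c :: rest)
  | _ => false

lemma loopA_eq_pvWin (nums : List Int) (i : Nat) :
    three_odd_numbers_loopA nums i 0 = pvWin (nums.drop i) := by
  induction hn : nums.length - i using Nat.strong_induction_on generalizing i with
  | _ n ih =>
  rw [three_odd_numbers_loopA]
  have hslice : PySem.List.slice nums (some (i : Int)) (some ((i : Int) + 3))
      = (nums.drop i).take 3 := by
    have := PySem.List.slice_natCast_add nums i 3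
    simpa using this
  by_cases h : i < nums.length
  · simp only [h, dif_pos, hslice]
    rcases hd : nums.drop i with _ | ⟨a, t1⟩
    · simp at hd; omega
    rcases t1 with _ | ⟨b, t2⟩
    · simp [pvWin]
    rcases t2 with _ | ⟨c, rest⟩
    · simp [pvWin]
    · have htake : ((a :: b :: c :: rest).take 3) = [a, b, c] := rfl
      simp only [htake]
      have hlen : ¬ ([a, b, c].length < 3) := by simp
      simp only [hlen, if_false, List.foldl]
      have hdrop : nums.drop (i + 1) = b :: c :: rest := by
        have h1 := congrArg (List.drop 1) hd
        rw [List.drop_drop] at h1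
        simpa [Nat.add_comm] using h1
      have hrec : nums.length - (i + 1) < n := by omega
      by_cases hm : PySem.Int.mod (0 + a + b + c) 2 = 0
      · have hm2 : (a + b + c) % 2 = 0 := by
          have := hm
          rw [PySem.Int.mod_eq_emod_of_pos (by omega : (0:Int) < 2)] at this
          simpa using this
        rw [if_pos (by simpa using hm), ih _ hrec (i + 1) rfl, hdrop, pvWin]
        simp [hm2]
      · have hm2 : ¬ (a + b + c) % 2 = 0 := by
          intro hc; apply hm
          rw [PySem.Int.mod_eq_emod_of_pos (by omega : (0:Int) < 2)]
          omega
        rw [if_neg (by simpa using hm), pvWin]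
        have hm1 : (a + b + c) % 2 = 1 := by omega
        simp [hm1]
  · have hd : nums.drop i = [] := by
      apply List.drop_eq_nil_of_le; omega
    simp [h, hd, pvWin]

lemma loopB_eq_pvWin (ys : List Int) : ∀ (a b c : Int),
    ((PySem.Int.mod (a + b + c) 2 ≠ 0 : Bool) ||
      three_odd_numbers_loopB (a + b + c) (a :: b :: c :: ys) ys)
    = pvWin (a :: b :: c :: ys) := by
  induction ys with
  | nil => intro a b c; simp [three_odd_numbers_loopB, pvWin]
  | cons y ys ih =>
    intro a b c
    rw [pvWin, ← ih b c y]
    rw [three_odd_numbers_loopB]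
    have ht : a + b + c + (y - a) = b + c + y := by ring
    simp only [ht]
    by_cases hm : PySem.Int.mod (b + c + y) 2 = 0
    · simp [hm]
    · simp [hm]

lemma alt_eq_pvWin (nums : List Int) : three_odd_numbers_alt nums = pvWin nums := by
  rcases nums with _ | ⟨a, _ | ⟨b, _ | ⟨c, rest⟩⟩⟩ <;> try rfl
  rw [three_odd_numbers_alt, ← loopB_eq_pvWin rest a b c]
  by_cases hm : PySem.Int.mod (a + b + c) 2 = 0
  · simp [hm]
  · simp [hm]

-- ===== VERDICT (by name: the statement is the Claim_ definition above) =====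
theorem three_odd_numbers_spec : Claim_equal_three_odd_numbers := by
  intro nums _
  unfold Spec_three_odd_numbers three_odd_numbers
  rw [alt_eq_pvWin]
  simpa using loopA_eq_pvWin nums 0
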